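-- pv_equiv track=rewrite | github.com/pohily/checkio | create_zigzag.py | create_zigzag
-- ===== SOURCE A (Python) =====
-- from typing import List
--
-- def create_zigzag(rows: int, cols: int, start: int = 1) -> List[List[int]]:
--     result = []
--     for r in range(rows):
--         if r % 2 == 1:
--             c = list(reversed(range(start, start+cols)))
--             start += cols
--             result.append(c)
--         else:
--             c = list(range(start, start+cols))
--             start += cols
--             result.append(c)
--     return result
-- ===== SOURCE B (Python) =====
-- from typing import List
--
-- def create_zigzag(rows: int, cols: int, start: int = 1) -> List[List[int]]:
--     return [[start + r * cols + (c if r % 2 == 0 else cols - 1 - c)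
--              for c in range(cols)]
--             for r in range(rows)]
-- ===== Notes on version B (the rewrite author's own statement) =====
-- stated objective: simpler
-- what changed: Replaces A's per-row accumulator loop with mutating start and reversed ranges by a single nested comprehension computing each cell in closed form start + r*cols + (c or cols-1-c).
import Mathlib
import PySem

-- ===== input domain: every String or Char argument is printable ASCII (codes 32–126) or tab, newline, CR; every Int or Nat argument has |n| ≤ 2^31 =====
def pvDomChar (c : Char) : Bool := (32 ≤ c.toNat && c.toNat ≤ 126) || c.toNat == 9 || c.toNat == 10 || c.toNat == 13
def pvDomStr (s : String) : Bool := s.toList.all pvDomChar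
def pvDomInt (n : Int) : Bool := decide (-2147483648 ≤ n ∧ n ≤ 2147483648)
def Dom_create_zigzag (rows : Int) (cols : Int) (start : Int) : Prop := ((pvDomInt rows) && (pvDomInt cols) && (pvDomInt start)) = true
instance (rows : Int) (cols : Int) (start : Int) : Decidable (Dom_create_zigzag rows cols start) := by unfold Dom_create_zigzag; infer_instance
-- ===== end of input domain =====

-- B is a closed-form nested comprehension; A is a per-row accumulator loop. Both total; proved equal on all inputs.

-- ===== PORT A =====
-- loop state = (start, result); odd rows append the reversed range, even rows the range; start += cols each row
def create_zigzag (rows : Int) (cols : Int) (start : Int) : List (List Int) :=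
  ((PySem.List.pyRange 0 rows 1).foldl
    (fun (st : Int × List (List Int)) r =>
      if r % 2 == 1 then
        (st.1 + cols, st.2 ++ [(PySem.List.pyRange st.1 (st.1 + cols) 1).reverse])
      else
        (st.1 + cols, st.2 ++ [PySem.List.pyRange st.1 (st.1 + cols) 1]))
    (start, [])).2

-- ===== PORT B =====
def create_zigzag_alt (rows : Int) (cols : Int) (start : Int) : List (List Int) :=
  (PySem.List.pyRange 0 rows 1).map (fun r =>
    (PySem.List.pyRange 0 cols 1).map (fun c =>
      start + r * cols + (if r % 2 == 0 then c else cols - 1 - c)))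

-- ===== PRECONDITION & SPEC =====
def Spec_create_zigzag (rows : Int) (cols : Int) (start : Int) (out : List (List Int)) : Prop := out = create_zigzag_alt rows cols start
instance (rows : Int) (cols : Int) (start : Int) (out : List (List Int)) : Decidable (Spec_create_zigzag rows cols start out) := by unfold Spec_create_zigzag; infer_instance

-- ===== CLAIM (what is proved, stated in full; the proofs are below) =====
def Claim_equal_create_zigzag : Prop := ∀ (rows : Int) (cols : Int) (start : Int), Dom_create_zigzag rows cols start → Spec_create_zigzag rows cols start (create_zigzag rows cols start)

-- ===== LEMMAS AND PROOFS =====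

-- row r of A, expressed with the start value s0 + r*cols it holds when reaching row r
def pvRowA (cols s0 : Int) (r : Int) : List Int :=
  if r % 2 == 1 then
    (PySem.List.pyRange (s0 + r * cols) (s0 + r * cols + cols) 1).reverse
  else
    PySem.List.pyRange (s0 + r * cols) (s0 + r * cols + cols) 1

lemma loopA (cols s0 : Int) (n : Nat) (acc : List (List Int)) :
    (PySem.List.pyRange 0 (n : Int) 1).foldl
      (fun (st : Int × List (List Int)) r =>
        if r % 2 == 1 then
          (st.1 + cols, st.2 ++ [(PySem.List.pyRange st.1 (st.1 + cols) 1).reverse])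
        else
          (st.1 + cols, st.2 ++ [PySem.List.pyRange st.1 (st.1 + cols) 1]))
      (s0, acc)
    = (s0 + n * cols, acc ++ (PySem.List.pyRange 0 (n : Int) 1).map (pvRowA cols s0)) := by
  induction n generalizing acc with
  | zero => simp [PySem.List.pyRange_one_eq_nil]
  | succ n ih =>
    have h : ((n : Int) + 1) = ((n + 1 : Nat) : Int) := by push_cast; ring
    rw [← h, PySem.List.pyRange_one_succ_right (by positivity)]
    rw [List.foldl_append, List.map_append, ih]
    simp only [List.foldl_cons, List.foldl_nil, List.map_cons, List.map_nil, pvRowA]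
    by_cases hm : (n : Int) % 2 == 1 <;>
      simp [hm, List.append_assoc] <;> ring

lemma rowEq (cols s0 r : Int) :
    pvRowA cols s0 r
    = (PySem.List.pyRange 0 cols 1).map (fun c =>
        s0 + r * cols + (if r % 2 == 0 then c else cols - 1 - c)) := by
  have h2 : r % 2 = 0 ∨ r % 2 = 1 := Int.emod_two_eq r
  unfold pvRowA
  rcases h2 with h | h
  · simp only [h, beq_iff_eq]
    norm_num
    rw [PySem.List.pyRange_one (s0 + r * cols), PySem.List.pyRange_one 0 cols, List.map_map]
    simp only [add_sub_cancel_left, Int.sub_zero]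
    apply List.map_congr_left
    intro k _; simp only [Function.comp_apply]; ring
  · simp only [h, beq_iff_eq]
    norm_num
    have hrev : (PySem.List.pyRange (s0 + r * cols) (s0 + r * cols + cols) 1).reverse
        = PySem.List.pyRange (s0 + r * cols + cols - 1) (s0 + r * cols - 1) (-1) := by
      rw [PySem.List.pyRange_neg_one_eq_reverse]
      congr 1 <;> ring
    rw [hrev, PySem.List.pyRange_neg_one, PySem.List.pyRange_one 0 cols, List.map_map]
    have : (s0 + r * cols + cols - 1 - (s0 + r * cols - 1)) = cols := by ring
    rw [this]
    simp only [Int.sub_zero]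
    apply List.map_congr_left
    intro k _; simp only [Function.comp_apply]; ring

-- ===== VERDICT (by name: the statement is the Claim_ definition above) =====
theorem create_zigzag_spec : Claim_equal_create_zigzag := by
  intro rows cols start _
  unfold Spec_create_zigzag create_zigzag create_zigzag_alt
  by_cases h : rows ≤ 0
  · rw [PySem.List.pyRange_one_eq_nil h]; rfl
  · rw [not_le] at h
    have hr : rows = ((rows.toNat : Int)) := (Int.toNat_of_nonneg h.le).symm
    rw [hr, loopA]
    simp only []
    apply List.map_congr_left
    intro r _
    exact rowEq cols start r
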